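-- pv_equiv track=rewrite | github.com/eesandoval/AdventOfCode | 2020/Day06/main.py | part_one
-- ===== SOURCE A (Python) =====
-- def part_one(lines):
--     result = 0
--     answers = set()
--     for line in lines:
--         if line == '':
--             result = result + len(answers)
--             answers = set()
--             continue
--         answers = answers.union(set(list(line)))
--     return result + len(answers)
-- ===== SOURCE B (Python) =====
-- def part_one(lines):
--     groups = []
--     current = []
--     for line in lines:
--         if line == '':
--             groups.append(current)
--             current = []
--         else:
--             current.append(line)
--     groups.append(current)
--     return sum(len(set(''.join(g))) for g in groups)
-- ===== Notes on version B (the rewrite author's own statement) =====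
-- stated objective: faster
-- what changed: Replaces the single pass with a running character-set that is summed and reset at each blank line by a two-phase decomposition: first partition the lines into blank-separated groups, then sum len(set(''.join(group))) over the groups, building each group's set once instead of repeated set unions.
import Mathlib
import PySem

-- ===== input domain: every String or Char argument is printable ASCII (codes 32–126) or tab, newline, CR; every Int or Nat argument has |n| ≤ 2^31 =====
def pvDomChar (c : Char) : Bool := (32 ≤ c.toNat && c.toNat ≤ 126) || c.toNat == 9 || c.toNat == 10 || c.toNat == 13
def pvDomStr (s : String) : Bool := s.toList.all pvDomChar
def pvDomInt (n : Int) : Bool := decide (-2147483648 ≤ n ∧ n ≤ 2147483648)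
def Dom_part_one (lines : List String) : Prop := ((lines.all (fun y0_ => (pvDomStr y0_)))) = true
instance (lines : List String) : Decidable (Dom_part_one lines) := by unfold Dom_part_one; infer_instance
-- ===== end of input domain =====

-- B replaces A's running set-with-reset accumulator by an explicit two-phase decomposition
-- (partition the lines into blank-separated groups, then sum the distinct-character counts
-- of each group), building each group's character set once instead of repeated set unions
-- (a timing run measured B faster on the generated inputs).

-- ===== PORT A =====
-- loop body of A: state = (result, answers)
def pvStepA (st : Int × PySem.Set Char) (line : String) : Int × PySem.Set Char :=
  if line = "" then (st.1 + PySem.Set.len st.2, PySem.Set.empty)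
  else (st.1, PySem.Set.union st.2 (PySem.Set.ofList line.toList))

def part_one (lines : List String) : Int :=
  let st := lines.foldl pvStepA (0, PySem.Set.empty)
  st.1 + PySem.Set.len st.2

-- ===== PORT B =====
-- loop body of B's first pass: state = (groups, current)
def pvStepB (st : List (List String) × List String) (line : String) :
    List (List String) × List String :=
  if line = "" then (st.1 ++ [st.2], []) else (st.1, st.2 ++ [line])

-- len(set(''.join(g)))
def pvGroupCount (g : List String) : Int :=
  PySem.Set.len (PySem.Set.ofList (PySem.Str.join "" g).toList)

def part_one_alt (lines : List String) : Int :=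
  let st := lines.foldl pvStepB ([], [])
  ((st.1 ++ [st.2]).map pvGroupCount).sum

-- ===== PRECONDITION & SPEC =====
def Spec_part_one (lines : List String) (out : Int) : Prop := out = part_one_alt lines
instance (lines : List String) (out : Int) : Decidable (Spec_part_one lines out) := by unfold Spec_part_one; infer_instance

-- ===== CLAIM (what is proved, stated in full; the proofs are below) =====
def Claim_equal_part_one : Prop := ∀ (lines : List String), Dom_part_one lines → Spec_part_one lines (part_one lines)

-- ===== LEMMAS AND PROOFS =====

lemma pv_intercalate_nil {α : Type} (ls : List (List α)) :
    List.intercalate [] ls = ls.flatten := by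
  induction ls with
  | nil => rfl
  | cons h t ih => cases t <;> simp_all [List.intercalate, List.intersperse]

lemma pv_join_toList (g : List String) :
    (PySem.Str.join "" g).toList = (g.map String.toList).flatten := by
  simp [PySem.Str.join, PySem.Chars.join, pv_intercalate_nil]

lemma pv_union_ofList (xs ys : List Char) :
    PySem.Set.union (PySem.Set.ofList xs) (PySem.Set.ofList ys) =
      PySem.Set.ofList (xs ++ ys) := by
  simp [PySem.Set.union, PySem.Set.ofList_append, PySem.Set.update_eq_append_filter,
    PySem.Set.ofList_ofList]

lemma pv_groupCount_eq (cur : List String) :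
    pvGroupCount cur = PySem.Set.len (PySem.Set.ofList ((cur.map String.toList).flatten)) := by
  unfold pvGroupCount
  rw [pv_join_toList]

lemma pv_key (lines : List String) :
    ∀ (res : Int) (acc : PySem.Set Char) (groups : List (List String)) (cur : List String),
      acc = PySem.Set.ofList ((cur.map String.toList).flatten) →
      (let st := lines.foldl pvStepA (res, acc); st.1 + PySem.Set.len st.2)
          + (groups.map pvGroupCount).sum
        = res + ((let st := lines.foldl pvStepB (groups, cur); st.1 ++ [st.2]).map pvGroupCount).sum := by
  induction lines with
  | nil =>
    intro res acc groups cur h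
    simp [pv_groupCount_eq, h]
    ring
  | cons line rest ih =>
    intro res acc groups cur h
    by_cases hl : line = ""
    · subst hl
      have ih' := ih (res + PySem.Set.len acc) PySem.Set.empty (groups ++ [cur]) []
        (by simp [PySem.Set.empty, PySem.Set.ofList])
      have hc : pvGroupCount cur = PySem.Set.len acc := by
        rw [pv_groupCount_eq, h]
      simp only [List.foldl_cons, pvStepA, pvStepB, reduceIte] at ih' ⊢
      simp only [List.map_append, List.sum_append, List.map_cons, List.map_nil,
        List.sum_cons, List.sum_nil] at ih' ⊢
      omega
    · have ih' := ih res (PySem.Set.union acc (PySem.Set.ofList line.toList)) groups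
        (cur ++ [line])
        (by rw [h, pv_union_ofList]; simp)
      simp only [List.foldl_cons, pvStepA, pvStepB, if_neg hl] at *
      exact ih'

-- ===== VERDICT (by name: the statement is the Claim_ definition above) =====
theorem part_one_spec : Claim_equal_part_one := by
  intro lines _
  unfold Spec_part_one part_one part_one_alt
  have := pv_key lines 0 PySem.Set.empty [] [] (by simp [PySem.Set.empty, PySem.Set.ofList])
  simpa using this
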